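-- pv_equiv track=rewrite | github.com/zivrefaeli/multi-game | temp/new/new.py | numbersInPi
-- ===== SOURCE A (Python) =====
-- def numbersInPi(pi: str, numbers: list):
--     ranges = []
--     map = {}
--
--     for number in numbers:
--         start = 0
--         while True:
--             try:
--                 index = pi.index(number, start)
--                 start = index + 1
--             except ValueError:
--                 break
--             else:
--                 length = len(number)
--                 ranges.append({"start": index, "end": index + length})
--
--     for range in ranges:
--         key = range['start']
--         if key in map:
--             map[key].append(range)
--         else:
--             map[key] = [range]
--
--     array = []
--     find(map, 0, len(pi), 0, array)
--     if len(array) == 0: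
--         return -1
--     return min(array)
--
-- def find(map, targetIndex, targetLength, count, counters):
--     array = map.get(targetIndex)
--     if not array:
--         return
--     for range in array:
--         end = range['end']
--         if end == targetLength:
--             counters.append(count)
--             return
--         find(map, end, targetLength, count + 1, counters)
-- ===== SOURCE B (Python) =====
-- def numbersInPi(pi: str, numbers: list):
--     words = []
--     for w in numbers:
--         if w and w not in words:
--             words.append(w)
--     n = len(pi)
--     best = [None] * (n + 1)
--     best[n] = 0
--     for i in range(n - 1, -1, -1):
--         cands = [1 + best[i + len(w)] for w in words
--                  if pi[i:i + len(w)] == w and best[i + len(w)] is not None]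
--         if cands:
--             best[i] = min(cands)
--     return -1 if best[0] is None else best[0] - 1
-- ===== Notes on version B (the rewrite author's own statement) =====
-- stated objective: alternative
-- what changed: A enumerates segmentation paths through a precomputed occurrence map by unmemoized recursion and takes the min of all path counts; B instead fills a right-to-left DP table best[i] = minimal number of patterns tiling pi[i:], one pass over positions with one pass over the patterns each.
-- outside the precondition, e.g. on numbersInPi('', ['']): A returns 0, B returns -1
import Mathlib
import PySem

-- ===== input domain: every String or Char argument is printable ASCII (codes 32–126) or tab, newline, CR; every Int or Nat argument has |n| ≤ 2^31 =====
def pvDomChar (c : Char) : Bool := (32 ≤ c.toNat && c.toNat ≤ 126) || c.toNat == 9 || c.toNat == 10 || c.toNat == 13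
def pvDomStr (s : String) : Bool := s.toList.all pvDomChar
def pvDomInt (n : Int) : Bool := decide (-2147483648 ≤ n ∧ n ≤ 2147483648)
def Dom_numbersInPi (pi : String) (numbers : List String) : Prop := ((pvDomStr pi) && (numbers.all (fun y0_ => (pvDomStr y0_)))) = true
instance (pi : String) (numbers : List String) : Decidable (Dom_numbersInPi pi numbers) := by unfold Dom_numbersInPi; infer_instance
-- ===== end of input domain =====

-- B replaces A's recursive path enumeration over an occurrence map by a right-to-left
-- DP over string positions (min segment count per suffix); a different algorithm, same results.

-- ===== PORT A =====

-- pi.index(number, start): first j ≥ start where number occurs in pi (none = ValueError)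
def pvIndexFrom (cs num : List Char) (i : Nat) : Option Nat :=
  if h : i ≤ cs.length then
    if (cs.drop i).take num.length = num then some i
    else pvIndexFrom cs num (i + 1)
  else none
termination_by cs.length + 1 - i

-- A's inner `while True` loop collecting {"start": index, "end": index+len} ranges, as (start, end)
-- pairs; fuel-bounded literal transcription (fuel = len(pi)+2 is ample: start strictly increases).
def pvOccs (cs num : List Char) : Nat → Nat → List (Int × Int)
  | 0, _ => []
  | Nat.succ f, start =>
    match pvIndexFrom cs num start with
    | none => []
    | some idx => ((idx : Int), ((idx + num.length : Nat) : Int)) :: pvOccs cs num f (idx + 1)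

def pvRanges (pi : String) (numbers : List String) : List (Int × Int) :=
  numbers.foldl (fun acc num => acc ++ pvOccs pi.toList num.toList (pi.toList.length + 2) 0) []

-- `if key in map: map[key].append(range) else: map[key] = [range]`
def pvMapStep (d : PySem.Dict Int (List (Int × Int))) (r : Int × Int) :
    PySem.Dict Int (List (Int × Int)) :=
  match PySem.Dict.get? d r.1 with
  | some arr => PySem.Dict.insert d r.1 (arr ++ [r])
  | none => PySem.Dict.insert d r.1 [r]

def pvMap (rs : List (Int × Int)) : PySem.Dict Int (List (Int × Int)) :=
  rs.foldl pvMapStep PySem.Dict.empty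

-- find(map, targetIndex, targetLength, count, counters): counters is threaded functionally; the
-- recursion is fuel-bounded (Python's recursion depth; fuel = len(pi)+2 is ample inside Pre_).
mutual
def pvFind (mp : PySem.Dict Int (List (Int × Int))) (tlen : Int) (fuel : Nat) (tidx : Int)
    (count : Int) (counters : List Int) : List Int :=
  match fuel with
  | 0 => counters
  | Nat.succ f =>
    match PySem.Dict.get? mp tidx with
    | none => counters
    | some arr => if arr = [] then counters else pvFindLoop mp tlen f arr count counters
termination_by (fuel, 0)

def pvFindLoop (mp : PySem.Dict Int (List (Int × Int))) (tlen : Int) (f : Nat)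
    (arr : List (Int × Int)) (count : Int) (counters : List Int) : List Int :=
  match arr with
  | [] => counters
  | r :: rest =>
    if r.2 = tlen then counters ++ [count]
    else pvFindLoop mp tlen f rest count (pvFind mp tlen f r.2 (count + 1) counters)
termination_by (f, arr.length)
end

def numbersInPi (pi : String) (numbers : List String) : Int :=
  let ranges := pvRanges pi numbers
  let mp := pvMap ranges
  let array := pvFind mp (pi.toList.length : Int) (pi.toList.length + 2) 0 0 []
  if array = [] then -1
  else
    match PySem.List.min? array (fun x => x) with
    | some m => m
    | none => -1

-- ===== PORT B =====

-- `words`: the distinct non-empty patterns, in first-occurrence order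
def pvAltWords (numbers : List String) : List String :=
  numbers.foldl (fun ws w => if w ≠ "" ∧ ¬ (w ∈ ws) then ws ++ [w] else ws) []

-- candidates at position i; `best` holds the DP values for positions i+1 .. n (suffix of the
-- Python array `best`), so Python's best[i + len(w)] is best[len(w) - 1] here.
def pvAltCands (cs : List Char) (words : List (List Char)) (i : Nat)
    (best : List (Option Int)) : List Int :=
  words.filterMap (fun w =>
    if (cs.drop i).take w.length = w then
      match best[w.length - 1]? with
      | some (some v) => some (1 + v)
      | _ => none
    else none)

-- `for i in range(n-1, -1, -1)`: prepend best[i] for i = k-1 down to 0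
def pvAltLoop (cs : List Char) (words : List (List Char)) : Nat → List (Option Int) → List (Option Int)
  | 0, best => best
  | Nat.succ k, best =>
    pvAltLoop cs words k
      ((match PySem.List.min? (pvAltCands cs words k best) (fun x => x) with
        | some m => some m
        | none => none) :: best)

def numbersInPi_alt (pi : String) (numbers : List String) : Int :=
  let words := (pvAltWords numbers).map String.toList
  let cs := pi.toList
  let best := pvAltLoop cs words cs.length [some 0]
  match best.head? with
  | some (some v) => v - 1
  | _ => -1

-- ===== PRECONDITION & SPEC =====
-- Pre_ excludes number lists containing the empty string: on those A recurses forever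
-- (RecursionError) whenever pi is nonempty, and on empty pi A returns 0 through a zero-length
-- "segment" — an artefact of matching the empty pattern that B does not reproduce.
def Pre_numbersInPi (pi : String) (numbers : List String) : Prop := ¬ ("" ∈ numbers)
instance (pi : String) (numbers : List String) : Decidable (Pre_numbersInPi pi numbers) := by
  unfold Pre_numbersInPi; infer_instance

def pvWitness_numbersInPi : String × List String := ("3141592", ["3141", "592", "1", "41"])

def Spec_numbersInPi (pi : String) (numbers : List String) (out : Int) : Prop := out = numbersInPi_alt pi numbers
instance (pi : String) (numbers : List String) (out : Int) : Decidable (Spec_numbersInPi pi numbers out) := by unfold Spec_numbersInPi; infer_instance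

-- ===== CLAIM (what is proved, stated in full; the proofs are below) =====
def Claim_equal_numbersInPi : Prop := ∀ (pi : String) (numbers : List String), Dom_numbersInPi pi numbers → Pre_numbersInPi pi numbers → Spec_numbersInPi pi numbers (numbersInPi pi numbers)

-- ===== LEMMAS AND PROOFS =====

-- the common specification: pvF cs ws i = minimal number of words of ws needed to tile cs from i
def pvF (cs : List Char) (ws : List (List Char)) (i : Nat) : Option Int :=
  if hi : i < cs.length then
    PySem.List.min? (ws.filterMap (fun w =>
      if hw : w ≠ [] ∧ (cs.drop i).take w.length = w then
        match pvF cs ws (i + w.length) with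
        | some v => some (1 + v)
        | none => none
      else none)) (fun x => x)
  else if i = cs.length then some 0 else none
termination_by cs.length - i
decreasing_by
  have h1 : 1 ≤ w.length := List.length_pos_iff.mpr hw.1
  omega

def pvCands (cs : List Char) (ws : List (List Char)) (i : Nat) : List Int :=
  ws.filterMap (fun w =>
    if w ≠ [] ∧ (cs.drop i).take w.length = w then
      match pvF cs ws (i + w.length) with
      | some v => some (1 + v)
      | none => none
    else none)

theorem pvF_lt {cs : List Char} {ws : List (List Char)} {i : Nat} (h : i < cs.length) :
    pvF cs ws i = PySem.List.min? (pvCands cs ws i) (fun x => x) := by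
  rw [pvF]
  rw [dif_pos h]
  rfl

theorem pvF_end {cs : List Char} {ws : List (List Char)} : pvF cs ws cs.length = some 0 := by
  rw [pvF]; simp

theorem pvF_gt {cs : List Char} {ws : List (List Char)} {i : Nat} (h : cs.length < i) :
    pvF cs ws i = none := by
  rw [pvF]
  rw [dif_neg (by omega : ¬ i < cs.length), if_neg (by omega : ¬ i = cs.length)]

theorem mem_pvCands {cs : List Char} {ws : List (List Char)} {i : Nat} {x : Int} :
    x ∈ pvCands cs ws i ↔
      ∃ w ∈ ws, w ≠ [] ∧ (cs.drop i).take w.length = w ∧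
        ∃ v, pvF cs ws (i + w.length) = some v ∧ x = 1 + v := by
  unfold pvCands
  rw [List.mem_filterMap]
  constructor
  · rintro ⟨w, hwmem, hx⟩
    by_cases hw : w ≠ [] ∧ (cs.drop i).take w.length = w
    · rw [if_pos hw] at hx
      cases hF : pvF cs ws (i + w.length) with
      | none => rw [hF] at hx; simp at hx
      | some v =>
        rw [hF] at hx; simp at hx
        exact ⟨w, hwmem, hw.1, hw.2, v, hF, hx.symm⟩
    · rw [if_neg hw] at hx; simp at hx
  · rintro ⟨w, hwmem, h1, h2, v, hF, hx⟩
    refine ⟨w, hwmem, ?_⟩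
    rw [if_pos ⟨h1, h2⟩, hF, hx]

-- matching a nonempty word forces the occurrence to fit inside the string
theorem match_le {cs w : List Char} {j : Nat} (hw : w ≠ [])
    (h : (cs.drop j).take w.length = w) : j + w.length ≤ cs.length := by
  have hlen := congrArg List.length h
  rw [List.length_take, List.length_drop] at hlen
  have h1 : min w.length (cs.length - j) ≤ cs.length - j := min_le_right _ _
  rw [hlen] at h1
  have h2 : 1 ≤ w.length := List.length_pos_iff.mpr hw
  omega

theorem pvF_nonneg {cs : List Char} {ws : List (List Char)} :
    ∀ i v, pvF cs ws i = some v → 0 ≤ v := by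
  intro i
  induction hn : cs.length - i using Nat.strong_induction_on generalizing i with
  | _ d IH =>
    intro v hv
    rcases lt_trichotomy i cs.length with hi | hi | hi
    · rw [pvF_lt hi] at hv
      have hmem := PySem.List.min?_mem hv
      rcases mem_pvCands.mp hmem with ⟨w, _, hw1, hw2, v', hF, hx⟩
      have h1 : 1 ≤ w.length := List.length_pos_iff.mpr hw1
      have : 0 ≤ v' := IH (cs.length - (i + w.length)) (by omega) (i + w.length) rfl v' hF
      omega
    · rw [hi, pvF_end] at hv
      simp at hv
      omega
    · rw [pvF_gt hi] at hv; exact absurd hv (by simp)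

-- characterization of PySem.List.min? with identity key on Int
theorem min?_id_of_mem_lb {l : List Int} {m : Int} (hm : m ∈ l) (hlb : ∀ y ∈ l, m ≤ y) :
    PySem.List.min? l (fun x => x) = some m := by
  cases h : PySem.List.min? l (fun x => x) with
  | none =>
    rw [PySem.List.min?_eq_none_iff] at h
    subst h; simp at hm
  | some m' =>
    have h1 : m' ∈ l := PySem.List.min?_mem h
    have h2 : (fun x : Int => x) m' ≤ (fun x : Int => x) m := PySem.List.min?_isMin h m hm
    have h2' : m' ≤ m := h2
    have h3 := hlb m' h1
    rw [show m' = m from le_antisymm h2' h3]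

-- ---------- B side ----------

theorem mem_altWords_aux (numbers : List String) :
    ∀ (acc : List String) (x : String),
      x ∈ numbers.foldl (fun ws w => if w ≠ "" ∧ ¬ (w ∈ ws) then ws ++ [w] else ws) acc ↔
        x ∈ acc ∨ (x ∈ numbers ∧ x ≠ "") := by
  induction numbers with
  | nil => simp
  | cons w rest IH =>
    intro acc x
    simp only [List.foldl_cons]
    by_cases hc : w ≠ "" ∧ ¬ (w ∈ acc)
    · rw [if_pos hc, IH]
      simp only [List.mem_append, List.mem_cons, List.not_mem_nil, or_false,
        List.mem_singleton]
      constructor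
      · rintro ((h | h) | h)
        · exact Or.inl h
        · exact Or.inr ⟨Or.inl h, h ▸ hc.1⟩
        · exact Or.inr ⟨Or.inr h.1, h.2⟩
      · rintro (h | ⟨(h | h), hx⟩)
        · exact Or.inl (Or.inl h)
        · exact Or.inl (Or.inr h)
        · exact Or.inr ⟨h, hx⟩
    · rw [if_neg hc, IH]
      have hc' : w = "" ∨ w ∈ acc := by
        by_cases h1 : w = ""
        · exact Or.inl h1
        · right; by_contra h2; exact hc ⟨h1, h2⟩
      simp only [List.mem_cons]
      constructor
      · rintro (h | h)
        · exact Or.inl h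
        · exact Or.inr ⟨Or.inr h.1, h.2⟩
      · rintro (h | ⟨(h | h), hx⟩)
        · exact Or.inl h
        · subst h
          rcases hc' with hc' | hc'
          · exact absurd hc' hx
          · exact Or.inl hc'
        · exact Or.inr ⟨h, hx⟩

theorem mem_altWords {numbers : List String} {x : String} :
    x ∈ pvAltWords numbers ↔ x ∈ numbers ∧ x ≠ "" := by
  unfold pvAltWords
  rw [mem_altWords_aux]
  simp

def pvWords (numbers : List String) : List (List Char) := (pvAltWords numbers).map String.toList

theorem mem_pvWords {numbers : List String} {w : List Char} :
    w ∈ pvWords numbers ↔ (∃ s ∈ numbers, s.toList = w) ∧ w ≠ [] := by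
  unfold pvWords
  simp only [List.mem_map]
  constructor
  · rintro ⟨s, hs, rfl⟩
    rw [mem_altWords] at hs
    refine ⟨⟨s, hs.1, rfl⟩, ?_⟩
    intro h
    exact hs.2 (by cases s; simp_all)
  · rintro ⟨⟨s, hs, rfl⟩, hne⟩
    refine ⟨s, mem_altWords.mpr ⟨hs, ?_⟩, rfl⟩
    intro h; subst h; simp at hne

theorem pvWords_ne_nil {numbers : List String} {w : List Char} (h : w ∈ pvWords numbers) :
    w ≠ [] := (mem_pvWords.mp h).2

theorem altCands_eq {cs : List Char} {ws : List (List Char)}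
    (hw : ∀ w ∈ ws, w ≠ []) {k : Nat} (hk : k < cs.length) :
    pvAltCands cs ws k ((List.range' (k + 1) (cs.length - (k + 1) + 1)).map (pvF cs ws)) =
      pvCands cs ws k := by
  unfold pvAltCands pvCands
  apply List.filterMap_congr
  intro w hwmem
  have hne := hw w hwmem
  have h1 : 1 ≤ w.length := List.length_pos_iff.mpr hne
  by_cases hm : (cs.drop k).take w.length = w
  · rw [if_pos hm, if_pos ⟨hne, hm⟩]
    have hfit : k + w.length ≤ cs.length := match_le hne hm
    have hidx : w.length - 1 < cs.length - (k + 1) + 1 := by omega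
    rw [List.getElem?_map, List.getElem?_range' hidx]
    have : k + 1 + 1 * (w.length - 1) = k + w.length := by omega
    rw [this]
    simp only [Option.map_some]
    cases pvF cs ws (k + w.length) <;> rfl
  · rw [if_neg hm, if_neg (by tauto)]

theorem altLoop_eq {cs : List Char} {ws : List (List Char)} (hw : ∀ w ∈ ws, w ≠ []) :
    ∀ k, k ≤ cs.length →
      pvAltLoop cs ws k ((List.range' k (cs.length - k + 1)).map (pvF cs ws)) =
        (List.range' 0 (cs.length + 1)).map (pvF cs ws) := by
  intro k
  induction k with
  | zero => intro _; rfl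
  | succ k IH =>
    intro hk
    have hklt : k < cs.length := by omega
    have hb : (match PySem.List.min?
        (pvAltCands cs ws k ((List.range' (k + 1) (cs.length - (k + 1) + 1)).map (pvF cs ws)))
        (fun x => x) with
      | some m => some m
      | none => none) = pvF cs ws k := by
      rw [altCands_eq hw hklt, ← pvF_lt hklt]
      cases pvF cs ws k <;> rfl
    have hsplit : (List.range' k (cs.length - k + 1)).map (pvF cs ws) =
        pvF cs ws k :: (List.range' (k + 1) (cs.length - (k + 1) + 1)).map (pvF cs ws) := by
      have h2 : cs.length - k + 1 = (cs.length - (k + 1) + 1) + 1 := by omega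
      rw [h2, List.range'_succ]
      simp
    show pvAltLoop cs ws (Nat.succ k) ((List.range' (k + 1) (cs.length - (k + 1) + 1)).map (pvF cs ws)) = _
    rw [pvAltLoop, hb, ← hsplit]
    exact IH (by omega)

theorem alt_eq {pi : String} {numbers : List String} :
    numbersInPi_alt pi numbers =
      match pvF pi.toList (pvWords numbers) 0 with
      | some v => v - 1
      | none => -1 := by
  unfold numbersInPi_alt
  have hw : ∀ w ∈ pvWords numbers, w ≠ [] := fun w h => pvWords_ne_nil h
  have hstart : ([some 0] : List (Option Int)) =
      (List.range' pi.toList.length (pi.toList.length - pi.toList.length + 1)).map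
        (pvF pi.toList (pvWords numbers)) := by
    rw [Nat.sub_self, List.range'_one, List.map_singleton, pvF_end]
  show (match (pvAltLoop pi.toList ((pvAltWords numbers).map String.toList)
      pi.toList.length [some 0]).head? with
    | some (some v) => v - 1
    | _ => -1) = _
  rw [show (pvAltWords numbers).map String.toList = pvWords numbers from rfl]
  rw [hstart, altLoop_eq hw pi.toList.length (le_refl _)]
  have : (List.range' 0 (pi.toList.length + 1)).map (pvF pi.toList (pvWords numbers)) =
      pvF pi.toList (pvWords numbers) 0 ::
        (List.range' 1 pi.toList.length).map (pvF pi.toList (pvWords numbers)) := by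
    rw [List.range'_succ]; simp
  rw [this]
  simp only [List.head?_cons]
  cases pvF pi.toList (pvWords numbers) 0 <;> rfl

-- ---------- A side: occurrences ----------

theorem indexFrom_some {cs num : List Char} :
    ∀ i j, pvIndexFrom cs num i = some j →
      i ≤ j ∧ j ≤ cs.length ∧ (cs.drop j).take num.length = num ∧
        ∀ k, i ≤ k → k < j → ¬ ((cs.drop k).take num.length = num) := by
  intro i
  induction hn : cs.length + 1 - i using Nat.strong_induction_on generalizing i with
  | _ d IH =>
    intro j hj
    rw [pvIndexFrom] at hj
    by_cases hi : i ≤ cs.length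
    · rw [dif_pos hi] at hj
      by_cases hm : (cs.drop i).take num.length = num
      · rw [if_pos hm] at hj
        cases hj
        exact ⟨le_refl _, hi, hm, fun k h1 h2 => absurd h2 (by omega)⟩
      · rw [if_neg hm] at hj
        obtain ⟨h1, h2, h3, h4⟩ := IH (cs.length + 1 - (i + 1)) (by omega) (i + 1) rfl j hj
        refine ⟨by omega, h2, h3, ?_⟩
        intro k hk1 hk2
        rcases Nat.eq_or_lt_of_le hk1 with rfl | hk
        · exact hm
        · exact h4 k hk hk2
    · rw [dif_neg hi] at hj; exact absurd hj (by simp)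

theorem indexFrom_none {cs num : List Char} :
    ∀ i, pvIndexFrom cs num i = none →
      ∀ j, i ≤ j → j ≤ cs.length → ¬ ((cs.drop j).take num.length = num) := by
  intro i
  induction hn : cs.length + 1 - i using Nat.strong_induction_on generalizing i with
  | _ d IH =>
    intro hnone j hij hjlen hm
    rw [pvIndexFrom] at hnone
    by_cases hi : i ≤ cs.length
    · rw [dif_pos hi] at hnone
      by_cases hmi : (cs.drop i).take num.length = num
      · rw [if_pos hmi] at hnone; exact absurd hnone (by simp)
      · rw [if_neg hmi] at hnone
        have hij' : i + 1 ≤ j := by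
          rcases Nat.eq_or_lt_of_le hij with rfl | h
          · exact absurd hm hmi
          · omega
        exact IH (cs.length + 1 - (i + 1)) (by omega) (i + 1) rfl hnone j hij' hjlen hm
    · omega

theorem mem_occs {cs num : List Char} (hnum : num ≠ []) :
    ∀ fuel start (r : Int × Int), cs.length + 1 - start < fuel →
      (r ∈ pvOccs cs num fuel start ↔
        ∃ j : Nat, start ≤ j ∧ (cs.drop j).take num.length = num ∧
          r = ((j : Int), ((j + num.length : Nat) : Int))) := by
  intro fuel
  induction fuel with
  | zero => intro start r h; omega
  | succ f IH =>
    intro start r hfuel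
    have h1 : 1 ≤ num.length := List.length_pos_iff.mpr hnum
    rw [pvOccs]
    cases hidx : pvIndexFrom cs num start with
    | none =>
      simp only [List.not_mem_nil, false_iff]
      rintro ⟨j, hj1, hj2, rfl⟩
      have hjlen : j ≤ cs.length := by have := match_le hnum hj2; omega
      exact indexFrom_none start hidx j hj1 hjlen hj2
    | some idx =>
      obtain ⟨hi1, hi2, hi3, hi4⟩ := indexFrom_some start idx hidx
      have hidxlt : idx < cs.length := by have := match_le hnum hi3; omega
      rw [List.mem_cons, IH (idx + 1) r (by omega)]
      constructor
      · rintro (rfl | ⟨j, hj1, hj2, rfl⟩)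
        · exact ⟨idx, hi1, hi3, rfl⟩
        · exact ⟨j, by omega, hj2, rfl⟩
      · rintro ⟨j, hj1, hj2, rfl⟩
        rcases lt_trichotomy j idx with h | rfl | h
        · exact absurd hj2 (hi4 j hj1 h)
        · exact Or.inl rfl
        · exact Or.inr ⟨j, by omega, hj2, rfl⟩

theorem mem_ranges {pi : String} {numbers : List String} (hpre : ¬ ("" ∈ numbers))
    {r : Int × Int} :
    r ∈ pvRanges pi numbers ↔
      ∃ w ∈ pvWords numbers, ∃ j : Nat,
        (pi.toList.drop j).take w.length = w ∧
          r = ((j : Int), ((j + w.length : Nat) : Int)) := by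
  unfold pvRanges
  rw [PySem.List.foldl_append_eq_flatMap]
  simp only [List.nil_append, List.mem_flatMap]
  constructor
  · rintro ⟨num, hnum, hr⟩
    have hne : num.toList ≠ [] := by
      intro h
      exact hpre (by have : num = "" := by cases num; simp_all
                     exact this ▸ hnum)
    rw [mem_occs hne _ _ _ (by omega)] at hr
    obtain ⟨j, _, hj2, hj3⟩ := hr
    exact ⟨num.toList, mem_pvWords.mpr ⟨⟨num, hnum, rfl⟩, hne⟩, j, hj2, hj3⟩
  · rintro ⟨w, hw, j, hj1, hj2⟩
    obtain ⟨⟨s, hs, rfl⟩, hne⟩ := mem_pvWords.mp hw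
    refine ⟨s, hs, ?_⟩
    rw [mem_occs hne _ _ _ (by omega)]
    exact ⟨j, Nat.zero_le _, hj1, hj2⟩

-- ---------- A side: the grouping map ----------

theorem mapStep_eq_modify (d : PySem.Dict Int (List (Int × Int))) (r : Int × Int) :
    pvMapStep d r = PySem.Dict.modify d r.1 [] (fun l => l ++ [r]) := by
  unfold pvMapStep PySem.Dict.modify
  cases h : PySem.Dict.get? d r.1 with
  | none =>
    rw [PySem.Dict.getD_of_get?_eq_none d _ h]
    rfl
  | some arr =>
    rw [PySem.Dict.getD_of_get?_eq_some d _ h]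


theorem pvMap_getD (rs : List (Int × Int)) (c : Int) :
    (pvMap rs).getD c [] = rs.filter (fun r => r.1 == c) := by
  unfold pvMap
  have h1 : rs.foldl pvMapStep PySem.Dict.empty =
      (rs.map (fun r => (r.1, r))).foldl
        (fun d p => PySem.Dict.modify d p.1 [] (fun l => l ++ [p.2])) PySem.Dict.empty := by
    rw [List.foldl_map]
    congr 1
    funext d r
    exact mapStep_eq_modify d r
  rw [h1, PySem.Dict.getD_foldl_modify_append]
  simp [List.filter_map, Function.comp_def]

theorem mem_mapGetD {pi : String} {numbers : List String} (hpre : ¬ ("" ∈ numbers))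
    {c : Int} {r : Int × Int} :
    r ∈ (pvMap (pvRanges pi numbers)).getD c [] ↔
      (∃ w ∈ pvWords numbers, ∃ j : Nat,
        (pi.toList.drop j).take w.length = w ∧
          r = ((j : Int), ((j + w.length : Nat) : Int))) ∧ r.1 = c := by
  rw [pvMap_getD, List.mem_filter]
  rw [mem_ranges hpre]
  simp [beq_iff_eq]

-- ---------- A side: the search ----------

theorem mem_getD_elim {pi : String} {numbers : List String} (hpre : ¬ ("" ∈ numbers))
    {i : Nat} {r : Int × Int}
    (h : r ∈ (pvMap (pvRanges pi numbers)).getD (i : Int) []) :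
    ∃ w ∈ pvWords numbers,
      r = ((i : Int), ((i + w.length : Nat) : Int)) ∧
        (pi.toList.drop i).take w.length = w := by
  obtain ⟨⟨w, hw, j, hm, hr⟩, h1⟩ := (mem_mapGetD hpre).mp h
  have hj : j = i := by
    rw [hr] at h1
    simp only at h1
    exact_mod_cast h1
  subst hj
  exact ⟨w, hw, hr, hm⟩

theorem mem_getD_intro {pi : String} {numbers : List String} (hpre : ¬ ("" ∈ numbers))
    {i : Nat} {w : List Char} (hw : w ∈ pvWords numbers)
    (hm : (pi.toList.drop i).take w.length = w) :
    ((i : Int), ((i + w.length : Nat) : Int)) ∈ (pvMap (pvRanges pi numbers)).getD (i : Int) [] :=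
  (mem_mapGetD hpre).mpr ⟨⟨w, hw, i, hm, rfl⟩, rfl⟩

theorem one_add_mem_cands {cs : List Char} {ws : List (List Char)} {i : Nat} {w : List Char}
    {v : Int} (hw : w ∈ ws) (hne : w ≠ []) (hm : (cs.drop i).take w.length = w)
    (hF : pvF cs ws (i + w.length) = some v) : (1 + v) ∈ pvCands cs ws i :=
  mem_pvCands.mpr ⟨w, hw, hne, hm, v, hF, rfl⟩

theorem pvF_le_of_mem_cands {cs : List Char} {ws : List (List Char)} {i : Nat} {m c : Int}
    (hi : i < cs.length) (hF : pvF cs ws i = some m) (hc : c ∈ pvCands cs ws i) : m ≤ c := by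
  rw [pvF_lt hi] at hF
  exact PySem.List.min?_isMin hF c hc

theorem pvF_ne_none_of_mem_cands {cs : List Char} {ws : List (List Char)} {i : Nat} {c : Int}
    (hi : i < cs.length) (hc : c ∈ pvCands cs ws i) : pvF cs ws i ≠ none := by
  rw [pvF_lt hi]
  intro h
  rw [PySem.List.min?_eq_none_iff] at h
  rw [h] at hc
  exact List.not_mem_nil hc

-- the result of find(...) relative to the already collected counters
def pvSpec (cs : List Char) (ws : List (List Char)) (count : Int) (i : Nat)
    (ex : List Int) : Prop :=
  match pvF cs ws i with
  | none => ex = []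
  | some m => (count + m - 1) ∈ ex ∧ ∀ x ∈ ex, count + m - 1 ≤ x

theorem loop_inv {pi : String} {numbers : List String} (hpre : ¬ ("" ∈ numbers))
    (f : Nat) {i : Nat} (hi : i < pi.toList.length)
    (HF : ∀ (e : Nat) (count : Int), e < pi.toList.length → pi.toList.length - e < f →
      ∃ ex : List Int,
        (∀ counters, pvFind (pvMap (pvRanges pi numbers)) (pi.toList.length : Int) f
            (e : Int) count counters = counters ++ ex) ∧
        pvSpec pi.toList (pvWords numbers) count e ex)
    (hfuel : pi.toList.length - i < f + 1) :
    ∀ (arr : List (Int × Int)),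
      (∀ r ∈ arr, r ∈ (pvMap (pvRanges pi numbers)).getD (i : Int) []) → ∀ (count : Int),
      ∃ ex : List Int,
        (∀ counters, pvFindLoop (pvMap (pvRanges pi numbers)) (pi.toList.length : Int) f
            arr count counters = counters ++ ex) ∧
        (∀ m, pvF pi.toList (pvWords numbers) i = some m → ∀ x ∈ ex, count + m - 1 ≤ x) ∧
        ((∃ r ∈ arr, r.2 = (pi.toList.length : Int)) → count ∈ ex) ∧
        ((∀ r ∈ arr, r.2 ≠ (pi.toList.length : Int)) →
          ∀ r ∈ arr, ∀ (e : Nat) (v : Int), r.2 = (e : Int) →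
            pvF pi.toList (pvWords numbers) e = some v → (count + v) ∈ ex) ∧
        (pvF pi.toList (pvWords numbers) i = none → ex = []) := by
  intro arr
  induction arr with
  | nil =>
    intro _ count
    refine ⟨[], fun counters => by rw [pvFindLoop]; simp, ?_, ?_, ?_, ?_⟩
    · intro m _ x hx; simp at hx
    · rintro ⟨r, hr, _⟩; simp at hr
    · intro _ r hr; simp at hr
    · intro _; rfl
  | cons r rest IH =>
    intro hmem count
    obtain ⟨w, hwmem, hr, hm⟩ := mem_getD_elim hpre (hmem r (List.mem_cons_self))
    have hwne : w ≠ [] := pvWords_ne_nil hwmem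
    have hwpos : 1 ≤ w.length := List.length_pos_iff.mpr hwne
    have hfit : i + w.length ≤ pi.toList.length := match_le hwne hm
    by_cases hend : r.2 = (pi.toList.length : Int)
    · -- early return: this segment reaches the end
      have hone : (1 : Int) ∈ pvCands pi.toList (pvWords numbers) i := by
        have hEn : i + w.length = pi.toList.length := by
          rw [hr] at hend
          simp only at hend
          exact_mod_cast hend
        have := one_add_mem_cands hwmem hwne hm (v := 0) (by rw [hEn]; exact pvF_end)
        simpa using this
      refine ⟨[count], fun counters => by rw [pvFindLoop]; rw [if_pos hend], ?_, ?_, ?_, ?_⟩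
      · intro m hFm x hx
        have hm1 : m ≤ 1 := pvF_le_of_mem_cands hi hFm hone
        simp at hx
        omega
      · intro _; exact List.mem_singleton.mpr rfl
      · intro hall
        exact absurd hend (hall r List.mem_cons_self)
      · intro hnone
        exact absurd hnone (pvF_ne_none_of_mem_cands hi hone)
    · -- recurse into this segment's end, then continue the loop
      have heN : ∃ e : Nat, r.2 = (e : Int) ∧ e = i + w.length := ⟨i + w.length, by rw [hr], rfl⟩
      obtain ⟨e, hre, hei⟩ := heN
      have helt : e < pi.toList.length := by
        rcases Nat.lt_or_ge e pi.toList.length with h | h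
        · exact h
        · exfalso
          have : e = pi.toList.length := by omega
          exact hend (by rw [hre, this])
      have hfe : pi.toList.length - e < f := by omega
      obtain ⟨ex₁, heq₁, hspec₁⟩ := HF e (count + 1) helt hfe
      obtain ⟨ex₂, heq₂, ha₂, hb₂, hc₂, hd₂⟩ :=
        IH (fun r' hr' => hmem r' (List.mem_cons_of_mem _ hr')) count
      refine ⟨ex₁ ++ ex₂, ?_, ?_, ?_, ?_, ?_⟩
      · intro counters
        rw [pvFindLoop, if_neg hend, hre, heq₁, heq₂, List.append_assoc]
      · intro m hFm x hx
        rcases List.mem_append.mp hx with hx | hx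
        · cases hFe : pvF pi.toList (pvWords numbers) e with
          | none =>
            unfold pvSpec at hspec₁
            rw [hFe] at hspec₁
            simp only at hspec₁
            rw [hspec₁] at hx
            simp at hx
          | some v =>
            unfold pvSpec at hspec₁
            rw [hFe] at hspec₁
            simp only at hspec₁
            have hlb := hspec₁.2 x hx
            have hcand : (1 + v) ∈ pvCands pi.toList (pvWords numbers) i :=
              one_add_mem_cands hwmem hwne hm (by rw [← hei]; exact hFe)
            have := pvF_le_of_mem_cands hi hFm hcand
            omega
        · exact ha₂ m hFm x hx
      · rintro ⟨r', hr', hr2⟩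
        rcases List.mem_cons.mp hr' with rfl | hr'
        · exact absurd hr2 hend
        · exact List.mem_append.mpr (Or.inr (hb₂ ⟨r', hr', hr2⟩))
      · intro hall r' hr' e' v hre' hFe'
        rcases List.mem_cons.mp hr' with rfl | hr'
        · have hee' : e' = e := by
            have : (e' : Int) = (e : Int) := by rw [← hre', hre]
            exact_mod_cast this
          subst hee'
          unfold pvSpec at hspec₁
          rw [hFe'] at hspec₁
          simp only at hspec₁
          have := hspec₁.1
          have hrw : count + 1 + v - 1 = count + v := by ring
          rw [hrw] at this
          exact List.mem_append.mpr (Or.inl this)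
        · exact List.mem_append.mpr
            (Or.inr (hc₂ (fun r'' hr'' => hall r'' (List.mem_cons_of_mem _ hr''))
              r' hr' e' v hre' hFe'))
      · intro hnone
        have hex₁ : ex₁ = [] := by
          cases hFe : pvF pi.toList (pvWords numbers) e with
          | none =>
            unfold pvSpec at hspec₁
            rw [hFe] at hspec₁
            exact hspec₁
          | some v =>
            exfalso
            have hcand : (1 + v) ∈ pvCands pi.toList (pvWords numbers) i :=
              one_add_mem_cands hwmem hwne hm (by rw [← hei]; exact hFe)
            exact pvF_ne_none_of_mem_cands hi hcand hnone
        rw [hex₁, hd₂ hnone]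
        rfl

theorem find_inv {pi : String} {numbers : List String} (hpre : ¬ ("" ∈ numbers)) :
    ∀ (fuel : Nat) (i : Nat) (count : Int), i < pi.toList.length →
      pi.toList.length - i < fuel →
      ∃ ex : List Int,
        (∀ counters, pvFind (pvMap (pvRanges pi numbers)) (pi.toList.length : Int) fuel
            (i : Int) count counters = counters ++ ex) ∧
        pvSpec pi.toList (pvWords numbers) count i ex := by
  intro fuel
  induction fuel with
  | zero => intro i count _ h; omega
  | succ f IHf =>
    intro i count hi hfuel
    cases hget : PySem.Dict.get? (pvMap (pvRanges pi numbers)) (i : Int) with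
    | none =>
      refine ⟨[], fun counters => by rw [pvFind]; rw [hget]; simp, ?_⟩
      have hF : pvF pi.toList (pvWords numbers) i = none := by
        rw [pvF_lt hi, PySem.List.min?_eq_none_iff]
        by_contra hne
        obtain ⟨c, hc⟩ := List.exists_mem_of_ne_nil _ hne
        obtain ⟨w, hwmem, hwne, hm, v, hFe, _⟩ := mem_pvCands.mp hc
        have := mem_getD_intro hpre hwmem hm
        rw [PySem.Dict.getD_of_get?_eq_none _ _ hget] at this
        exact List.not_mem_nil this
      unfold pvSpec
      rw [hF]
    | some arr =>
      have hgetD : (pvMap (pvRanges pi numbers)).getD (i : Int) [] = arr :=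
        PySem.Dict.getD_of_get?_eq_some _ _ hget
      by_cases harrnil : arr = []
      · subst harrnil
        refine ⟨[], fun counters => by rw [pvFind]; rw [hget]; simp, ?_⟩
        have hF : pvF pi.toList (pvWords numbers) i = none := by
          rw [pvF_lt hi, PySem.List.min?_eq_none_iff]
          by_contra hne
          obtain ⟨c, hc⟩ := List.exists_mem_of_ne_nil _ hne
          obtain ⟨w, hwmem, hwne, hm, v, hFe, _⟩ := mem_pvCands.mp hc
          have := mem_getD_intro hpre hwmem hm
          rw [hgetD] at this
          exact List.not_mem_nil this
        unfold pvSpec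
        rw [hF]
      · obtain ⟨ex, heq, ha, hb, hc, hd⟩ :=
          loop_inv hpre f hi IHf hfuel arr (fun r hr => by rw [hgetD]; exact hr) count
        refine ⟨ex, fun counters => ?_, ?_⟩
        · rw [pvFind]
          rw [hget]
          show (if arr = [] then counters
            else pvFindLoop (pvMap (pvRanges pi numbers)) (pi.toList.length : Int) f
              arr count counters) = counters ++ ex
          rw [if_neg harrnil]
          exact heq counters
        unfold pvSpec
        cases hF : pvF pi.toList (pvWords numbers) i with
        | none => exact hd hF
        | some m =>
          refine ⟨?_, ha m hF⟩
          have hFm := hF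
          rw [pvF_lt hi] at hFm
          obtain ⟨w, hwmem, hwne, hm, v, hFe, hmv⟩ :=
            mem_pvCands.mp (PySem.List.min?_mem hFm)
          have hwpos : 1 ≤ w.length := List.length_pos_iff.mpr hwne
          have hfit : i + w.length ≤ pi.toList.length := match_le hwne hm
          by_cases hex : ∃ r ∈ arr, r.2 = (pi.toList.length : Int)
          · have hcount : count ∈ ex := hb hex
            obtain ⟨r, hrmem, hr2⟩ := hex
            obtain ⟨w', hw'mem, hr', hm'⟩ :=
              mem_getD_elim hpre (show r ∈ _ from by rw [hgetD]; exact hrmem)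
            have hEn : i + w'.length = pi.toList.length := by
              rw [hr'] at hr2
              simp only at hr2
              exact_mod_cast hr2
            have hone : (1 : Int) ∈ pvCands pi.toList (pvWords numbers) i := by
              have := one_add_mem_cands hw'mem (pvWords_ne_nil hw'mem) hm' (v := 0)
                (by rw [hEn]; exact pvF_end)
              simpa using this
            have hm1 : m ≤ 1 := pvF_le_of_mem_cands hi hF hone
            have hv0 : 0 ≤ v := pvF_nonneg _ v hFe
            have : count + m - 1 = count := by omega
            rw [this]
            exact hcount
          · have hall : ∀ r ∈ arr, r.2 ≠ (pi.toList.length : Int) := by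
              intro r hr h
              exact hex ⟨r, hr, h⟩
            have hrm : ((i : Int), ((i + w.length : Nat) : Int)) ∈ arr := by
              rw [← hgetD]
              exact mem_getD_intro hpre hwmem hm
            have := hc hall _ hrm (i + w.length) v rfl hFe
            have hrw : count + m - 1 = count + v := by omega
            rw [hrw]
            exact this

theorem find_top {pi : String} {numbers : List String} (hpre : ¬ ("" ∈ numbers)) :
    numbersInPi pi numbers =
      match pvF pi.toList (pvWords numbers) 0 with
      | some v => v - 1
      | none => -1 := by
  by_cases hn : pi.toList.length = 0
  · have hranges : pvRanges pi numbers = [] := by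
      apply List.eq_nil_iff_forall_not_mem.mpr
      intro r hr
      obtain ⟨w, hw, j, hm, _⟩ := (mem_ranges hpre).mp hr
      have hwne := pvWords_ne_nil hw
      have := match_le hwne hm
      have hwpos : 1 ≤ w.length := List.length_pos_iff.mpr hwne
      omega
    show (if pvFind (pvMap (pvRanges pi numbers)) (pi.toList.length : Int)
        (pi.toList.length + 2) 0 0 [] = [] then (-1 : Int)
      else
        match PySem.List.min? (pvFind (pvMap (pvRanges pi numbers)) (pi.toList.length : Int)
            (pi.toList.length + 2) 0 0 []) (fun x => x) with
        | some m => m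
        | none => -1) = _
    rw [hranges, hn]
    have hfind : pvFind (pvMap ([] : List (Int × Int))) ((0 : Nat) : Int) (0 + 2) 0 0 [] = [] := by
      rw [pvFind]
      rfl
    rw [hfind]
    rw [if_pos rfl]
    have hF0 : pvF pi.toList (pvWords numbers) 0 = some 0 := by
      have h := pvF_end (cs := pi.toList) (ws := pvWords numbers)
      rw [hn] at h
      exact h
    rw [hF0]
    decide
  · have hpos : 0 < pi.toList.length := Nat.pos_of_ne_zero hn
    obtain ⟨ex, heq, hspec⟩ :=
      find_inv hpre (pi.toList.length + 2) 0 0 hpos (by omega)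
    show (if pvFind (pvMap (pvRanges pi numbers)) (pi.toList.length : Int)
        (pi.toList.length + 2) 0 0 [] = [] then (-1 : Int)
      else
        match PySem.List.min? (pvFind (pvMap (pvRanges pi numbers)) (pi.toList.length : Int)
            (pi.toList.length + 2) 0 0 []) (fun x => x) with
        | some m => m
        | none => -1) = _
    have harr : pvFind (pvMap (pvRanges pi numbers)) (pi.toList.length : Int)
        (pi.toList.length + 2) ((0 : Nat) : Int) 0 [] = [] ++ ex := heq []
    simp only [List.nil_append] at harr
    rw [show ((0 : Nat) : Int) = (0 : Int) from rfl] at harr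
    rw [harr]
    unfold pvSpec at hspec
    cases hF : pvF pi.toList (pvWords numbers) 0 with
    | none =>
      rw [hF] at hspec
      simp only at hspec
      rw [hspec, if_pos rfl]
    | some m =>
      rw [hF] at hspec
      simp only at hspec
      obtain ⟨hmem, hlb⟩ := hspec
      have hne : ex ≠ [] := List.ne_nil_of_mem hmem
      rw [if_neg hne]
      have hmin : PySem.List.min? ex (fun x => x) = some (0 + m - 1) :=
        min?_id_of_mem_lb hmem hlb
      rw [hmin]
      show (0 + m - 1 : Int) = m - 1
      omega

-- ===== VERDICT (by name: the statement is the Claim_ definition above) =====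
theorem numbersInPi_spec : Claim_equal_numbersInPi := by
  intro pi numbers _ hpre
  unfold Spec_numbersInPi
  rw [find_top hpre, alt_eq]
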